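-- pv_equiv track=rewrite | github.com/minghaoliu98/WelshPowellGraphColoring | coloradvance.py | getSortedV
-- ===== SOURCE A (Python) =====
-- import operator
--
-- def getSortedV(graph):
--     temp = {}
--     for i, j in graph.items():
--         temp[i] = len(j)
--     temp2 = sorted(temp.items(), key=operator.itemgetter(1))
--     result = []
--     for i in temp2:
--         result.append(i[0])
--     return result
-- ===== SOURCE B (Python) =====
-- def getSortedV(graph):
--     if not graph:
--         return []
--     degs = [(v, len(adj)) for v, adj in graph.items()]
--     maxdeg = max(d for _, d in degs)
--     buckets = [[] for _ in range(maxdeg + 1)]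
--     for v, d in degs:
--         buckets[d].append(v)
--     return [v for bucket in buckets for v in bucket]
-- ===== Notes on version B (the rewrite author's own statement) =====
-- stated objective: alternative
-- what changed: B replaces the comparison sort of (vertex, degree) pairs by a counting sort: it appends each vertex to a bucket indexed by its degree and concatenates the buckets in ascending degree order; Pre_ requires pairwise-distinct keys in the association list because the argument models a Python dict, which cannot hold duplicate keys.
import Mathlib
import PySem

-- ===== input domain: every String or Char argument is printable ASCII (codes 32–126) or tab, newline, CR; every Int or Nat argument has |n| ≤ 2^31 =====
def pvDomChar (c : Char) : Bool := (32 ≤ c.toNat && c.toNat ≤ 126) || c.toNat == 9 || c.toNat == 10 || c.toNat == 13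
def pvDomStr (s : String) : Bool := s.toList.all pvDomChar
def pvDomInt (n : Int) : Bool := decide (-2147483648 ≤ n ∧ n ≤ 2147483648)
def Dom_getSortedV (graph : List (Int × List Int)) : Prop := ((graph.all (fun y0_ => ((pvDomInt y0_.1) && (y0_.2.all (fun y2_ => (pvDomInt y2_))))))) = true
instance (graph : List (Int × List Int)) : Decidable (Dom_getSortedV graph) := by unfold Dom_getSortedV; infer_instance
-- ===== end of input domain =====

-- B replaces the comparison sort of (vertex, degree) pairs by a counting sort into
-- degree-indexed buckets concatenated in ascending order (objective: alternative algorithm).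


-- ===== PORT A =====
def getSortedV (graph : List (Int × List Int)) : List Int :=
  let temp : PySem.Dict Int Int :=
    graph.foldl (fun d p => d.insert p.1 (p.2.length : Int)) PySem.Dict.empty
  let temp2 := PySem.List.sorted temp.items (fun p => p.2)
  temp2.foldl (fun acc p => acc ++ [p.1]) []

-- ===== PORT B =====
-- buckets[d].append(v)
def bucketStep (bs : List (List Int)) (p : Int × Int) : List (List Int) :=
  bs.set p.2.toNat (bs.getD p.2.toNat [] ++ [p.1])

def getSortedV_alt (graph : List (Int × List Int)) : List Int :=
  match graph.map (fun p => (p.1, (p.2.length : Int))) with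
  | [] => []
  | d0 :: rest =>
    let maxdeg : Int := (rest.map (fun p => p.2)).foldl max d0.2
    ((d0 :: rest).foldl bucketStep (List.replicate (maxdeg + 1).toNat [])).flatten

-- ===== PRECONDITION & SPEC =====
-- Pre_ requires pairwise-distinct keys: the argument models a Python dict, which cannot
-- hold duplicate keys, so the excluded association lists correspond to no Python input.
def Pre_getSortedV (graph : List (Int × List Int)) : Prop := (graph.map (fun p => p.1)).Nodup
instance (graph : List (Int × List Int)) : Decidable (Pre_getSortedV graph) := by
  unfold Pre_getSortedV; infer_instance

def pvWitness_getSortedV : (List (Int × List Int)) := [(1, [2, 3]), (2, [1]), (3, [])]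

def Spec_getSortedV (graph : List (Int × List Int)) (out : List Int) : Prop := out = getSortedV_alt graph
instance (graph : List (Int × List Int)) (out : List Int) : Decidable (Spec_getSortedV graph out) := by unfold Spec_getSortedV; infer_instance

-- ===== CLAIM (what is proved, stated in full; the proofs are below) =====
def Claim_equal_getSortedV : Prop := ∀ (graph : List (Int × List Int)), Dom_getSortedV graph → Pre_getSortedV graph → Spec_getSortedV graph (getSortedV graph)

-- ===== LEMMAS AND PROOFS =====

-- inserting x into l₁ ++ l₂, where l₁ holds only keys ≤ x.2 and l₂ only keys > x.2,
-- puts x exactly between them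
lemma insertBy_middle (x : Int × Int) (l₁ l₂ : List (Int × Int))
    (h₁ : ∀ y ∈ l₁, ¬ x.2 < y.2) (h₂ : ∀ y ∈ l₂, x.2 < y.2) :
    PySem.List.insertBy (fun a b => decide (a.2 < b.2)) x (l₁ ++ l₂) = l₁ ++ x :: l₂ := by
  induction l₁ with
  | nil =>
    cases l₂ with
    | nil => simp [PySem.List.insertBy]
    | cons y t =>
      have := h₂ y (by simp)
      simp [PySem.List.insertBy, this]
  | cons y t ih =>
    have hy : ¬ x.2 < y.2 := h₁ y (by simp)
    simp only [List.cons_append, PySem.List.insertBy, hy, decide_false, Bool.false_eq_true,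
      if_false]
    rw [ih (fun z hz => h₁ z (by simp [hz]))]

-- the stable sort by key = snd is the concatenation, over ascending key values,
-- of the key-filtered sublists
lemma sorted_eq_range_flatMap (m : Nat) (deg : List (Int × Int))
    (h : ∀ p ∈ deg, 0 ≤ p.2 ∧ p.2 < (m : Int)) :
    PySem.List.sorted deg (fun p => p.2) =
      (List.range m).flatMap (fun (k : Nat) => deg.filter (fun p => decide (p.2 = (k : Int)))) := by
  induction deg using List.reverseRecOn with
  | nil => simp [PySem.List.sorted_eq_foldl_insertBy]
  | append_singleton xs x ih =>
    have hx := h x (by simp)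
    set j := x.2.toNat with hj
    have hxj : x.2 = (j : Int) := (Int.toNat_of_nonneg hx.1).symm
    have hjm : j + 1 ≤ m := by
      have : (j : Int) < (m : Int) := hxj ▸ hx.2
      omega
    rw [PySem.List.sorted_eq_foldl_insertBy, List.foldl_append, List.foldl_cons, List.foldl_nil,
      ← PySem.List.sorted_eq_foldl_insertBy, ih (fun p hp => h p (by simp [hp]))]
    have hm : m = (j + 1) + (m - (j + 1)) := by omega
    rw [hm, List.range_add, List.flatMap_append, List.flatMap_append]
    -- high part: filters of xs ++ [x] agree with filters of xs (keys there exceed x.2)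
    have hhigh : (List.map (fun i => j + 1 + i) (List.range (m - (j + 1)))).flatMap
          (fun (k : Nat) => (xs ++ [x]).filter (fun p => decide (p.2 = (k : Int)))) =
        (List.map (fun i => j + 1 + i) (List.range (m - (j + 1)))).flatMap
          (fun (k : Nat) => xs.filter (fun p => decide (p.2 = (k : Int)))) := by
      apply List.flatMap_congr
      intro k hk
      simp only [List.mem_map, List.mem_range] at hk
      obtain ⟨i, _, rfl⟩ := hk
      rw [List.filter_append]
      have : ¬ x.2 = ((j : Int) + 1 + (i : Int)) := by omega
      simp [this]
    rw [hhigh]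
    -- low part: split range (j+1) = range j ++ [j]; x lands at the end of bucket j
    have hlowx : (List.range (j + 1)).flatMap
          (fun (k : Nat) => (xs ++ [x]).filter (fun p => decide (p.2 = (k : Int)))) =
        (List.range (j + 1)).flatMap
          (fun (k : Nat) => xs.filter (fun p => decide (p.2 = (k : Int)))) ++ [x] := by
      rw [List.range_succ, List.flatMap_append, List.flatMap_append]
      have hlow : (List.range j).flatMap
            (fun (k : Nat) => (xs ++ [x]).filter (fun p => decide (p.2 = (k : Int)))) =
          (List.range j).flatMap (fun (k : Nat) => xs.filter (fun p => decide (p.2 = (k : Int)))) := by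
        apply List.flatMap_congr
        intro k hk
        simp only [List.mem_range] at hk
        rw [List.filter_append]
        have : ¬ (x.2 = (k : Int)) := by omega
        simp [this]
      rw [hlow, List.flatMap_singleton, List.flatMap_singleton, List.filter_append]
      have : x.2 = (j : Int) := hxj
      simp [this, List.append_assoc]
    rw [hlowx, List.append_assoc, List.singleton_append]
    apply insertBy_middle
    · intro y hy
      simp only [List.mem_flatMap, List.mem_range, List.mem_filter, decide_eq_true_eq] at hy
      obtain ⟨k, hk, _, hyk⟩ := hy
      omega
    · intro y hy
      simp only [List.mem_flatMap, List.mem_map, List.mem_range, List.mem_filter,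
        decide_eq_true_eq] at hy
      obtain ⟨k, ⟨i, hi, rfl⟩, _, hyk⟩ := hy
      omega

lemma length_foldl_bucketStep (deg : List (Int × Int)) (bs : List (List Int)) :
    (deg.foldl bucketStep bs).length = bs.length := by
  induction deg generalizing bs with
  | nil => rfl
  | cons p t ih => simp [List.foldl_cons, ih, bucketStep]

-- after the bucket-filling loop, bucket k holds exactly the first components of the
-- pairs with degree k, in input order
lemma getD_foldl_bucketStep (deg : List (Int × Int)) (bs : List (List Int)) (k : Nat)
    (h : ∀ p ∈ deg, p.2.toNat < bs.length) :
    (deg.foldl bucketStep bs).getD k [] =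
      bs.getD k [] ++ (deg.filter (fun p => decide (p.2.toNat = k))).map Prod.fst := by
  induction deg generalizing bs with
  | nil => simp
  | cons p t ih =>
    rw [List.foldl_cons, ih _ (by intro q hq; simpa [bucketStep] using h q (by simp [hq]))]
    have hb : (bucketStep bs p).getD k [] =
        if p.2.toNat = k then bs.getD k [] ++ [p.1] else bs.getD k [] := by
      unfold bucketStep
      by_cases hpk : p.2.toNat = k
      · subst hpk
        rw [if_pos rfl]
        rw [List.getD_eq_getElem?_getD, List.getElem?_set_self (h p (by simp))]
        rfl
      · rw [if_neg hpk, List.getD_eq_getElem?_getD, List.getElem?_set_ne hpk,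
          ← List.getD_eq_getElem?_getD]
    rw [hb, List.filter_cons]
    by_cases hpk : p.2.toNat = k
    · simp [hpk, List.append_assoc]
    · simp [hpk]

lemma flatten_eq_range_flatMap (L : List (List Int)) :
    L.flatten = (List.range L.length).flatMap (fun (k : Nat) => L.getD k []) := by
  induction L with
  | nil => simp
  | cons x t ih =>
    rw [List.flatten_cons, List.length_cons, List.range_succ_eq_map, List.flatMap_cons,
      List.flatMap_map]
    simp only [List.getD_cons_zero, Nat.succ_eq_add_one, List.getD_cons_succ]
    rw [ih]

lemma getSortedV_eq (graph : List (Int × List Int)) (hpre : (graph.map (fun p => p.1)).Nodup) :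
    getSortedV graph = getSortedV_alt graph := by
  have hitems : (graph.foldl (fun d p => d.insert p.1 (p.2.length : Int)) (PySem.Dict.empty : PySem.Dict Int Int)).items
      = graph.map (fun p => (p.1, (p.2.length : Int))) := by
    have := PySem.Dict.items_foldl_insert_fresh graph (fun p => p.1)
      (fun p => ((p.2.length : Int))) (PySem.Dict.empty : PySem.Dict Int Int)
      (fun a _ => by simp [PySem.Dict.contains_empty]) hpre
    simpa using this
  have hA : getSortedV graph =
      (PySem.List.sorted (graph.map (fun p => (p.1, (p.2.length : Int)))) (fun p => p.2)).map Prod.fst := by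
    simp only [getSortedV, hitems]
    rw [PySem.List.foldl_append_singleton_eq_map, List.nil_append]
  cases hdeg : graph.map (fun p => (p.1, (p.2.length : Int))) with
  | nil =>
    rw [hA, hdeg]
    simp [getSortedV_alt, hdeg, PySem.List.sorted_eq_foldl_insertBy]
  | cons d0 rest =>
    rw [hA, hdeg]
    simp only [getSortedV_alt, hdeg]
    set M : Int := (rest.map (fun p => p.2)).foldl max d0.2 with hM
    have hnn : ∀ p ∈ d0 :: rest, 0 ≤ p.2 := by
      intro p hp
      rw [← hdeg] at hp
      simp only [List.mem_map] at hp
      obtain ⟨q, _, rfl⟩ := hp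
      exact Int.natCast_nonneg _
    have hle : ∀ p ∈ d0 :: rest, p.2 ≤ M := by
      intro p hp
      rcases List.mem_cons.mp hp with rfl | hmem
      · exact (PySem.List.le_foldl_max _ _).1
      · exact (PySem.List.le_foldl_max _ _).2 p.2 (List.mem_map_of_mem hmem)
    have hM0 : 0 ≤ M := le_trans (hnn d0 (by simp)) (hle d0 (by simp))
    have hmi : (((M + 1).toNat : Nat) : Int) = M + 1 := Int.toNat_of_nonneg (by omega)
    rw [sorted_eq_range_flatMap (M + 1).toNat _
      (by intro p hp; exact ⟨hnn p hp, by have := hle p hp; omega⟩)]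
    rw [List.map_flatMap]
    rw [flatten_eq_range_flatMap, length_foldl_bucketStep, List.length_replicate]
    apply List.flatMap_congr
    intro k _
    rw [getD_foldl_bucketStep _ _ _
      (by intro p hp; rw [List.length_replicate]; have := hle p hp; have := hnn p hp; omega)]
    have hrep : (List.replicate (M + 1).toNat ([] : List Int)).getD k [] = [] := by
      rw [List.getD_eq_getElem?_getD, List.getElem?_replicate]
      split <;> rfl
    rw [hrep, List.nil_append]
    congr 1
    apply List.filter_congr
    intro p hp
    have := hnn p hp
    simp only [decide_eq_decide]
    omega

-- ===== VERDICT (by name: the statement is the Claim_ definition above) =====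
theorem getSortedV_spec : Claim_equal_getSortedV := by
  intro graph _ hpre
  unfold Spec_getSortedV
  exact getSortedV_eq graph hpre
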